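-- pv_equiv track=rewrite | github.com/AndreiRekaev/Python-practice | 100daysofcode/16-18 list comp and generators/bite26.py | filter_bites
-- ===== SOURCE A (Python) =====
-- from typing import Dict, Set
--
-- DEFAULT_BITES = {
--     6: "PyBites Die Hard",
--     7: "Parsing dates from logs",
--     9: "Palindromes",
--     10: "Practice exceptions",
--     11: "Enrich a class with dunder methods",
--     12: "Write a user validation function",
--     13: "Convert dict in namedtuple/json",
--     14: "Generate a table of n sequences",
--     15: "Enumerate 2 sequences",
--     16: "Special PyBites date generator",
--     17: "Form teams from a group of friends",
--     18: "Find the most common word",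
--     19: "Write a simple property",
--     20: "Write a context manager",
--     21: "Query a nested data structure",
-- }
--
-- EXCLUDE_BITES = {6, 10, 16, 18, 21}
--
-- def filter_bites(
--     bites: Dict[int, str] = DEFAULT_BITES,
--     bites_done: Set[int] = EXCLUDE_BITES
-- ) -> Dict[int, str]:
--     """
--     Return the bites dict with bites_done filtered out.
--     """
--     return {num: bite for num, bite in bites.items() if num not in bites_done}
--
-- # another way
--     for d in exclude_bites:
--         bites.pop(d)
--     return bites
-- ===== SOURCE B (Python) =====
-- DEFAULT_BITES = {
--     6: "PyBites Die Hard",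
--     7: "Parsing dates from logs",
--     9: "Palindromes",
--     10: "Practice exceptions",
--     11: "Enrich a class with dunder methods",
--     12: "Write a user validation function",
--     13: "Convert dict in namedtuple/json",
--     14: "Generate a table of n sequences",
--     15: "Enumerate 2 sequences",
--     16: "Special PyBites date generator",
--     17: "Form teams from a group of friends",
--     18: "Find the most common word",
--     19: "Write a simple property",
--     20: "Write a context manager",
--     21: "Query a nested data structure",
-- }
--
-- EXCLUDE_BITES = {6, 10, 16, 18, 21}
--
--
-- def filter_bites(bites=DEFAULT_BITES, bites_done=EXCLUDE_BITES):
--     """Return the bites dict with bites_done filtered out."""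
--     done = set(bites_done)
--     items = list(bites.items())
--     kept = []
--     while items:
--         num, bite = items.pop()  # consume back-to-front
--         if num not in done:
--             kept.append((num, bite))
--     kept.reverse()
--     return dict(kept)
-- ===== Notes on version B (the rewrite author's own statement) =====
-- stated objective: alternative
-- what changed: B replaces the dict comprehension by an explicit worklist loop that consumes the items back-to-front with pop(), accumulates the kept pairs, reverses them and rebuilds the dict at the end.
import Mathlib
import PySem

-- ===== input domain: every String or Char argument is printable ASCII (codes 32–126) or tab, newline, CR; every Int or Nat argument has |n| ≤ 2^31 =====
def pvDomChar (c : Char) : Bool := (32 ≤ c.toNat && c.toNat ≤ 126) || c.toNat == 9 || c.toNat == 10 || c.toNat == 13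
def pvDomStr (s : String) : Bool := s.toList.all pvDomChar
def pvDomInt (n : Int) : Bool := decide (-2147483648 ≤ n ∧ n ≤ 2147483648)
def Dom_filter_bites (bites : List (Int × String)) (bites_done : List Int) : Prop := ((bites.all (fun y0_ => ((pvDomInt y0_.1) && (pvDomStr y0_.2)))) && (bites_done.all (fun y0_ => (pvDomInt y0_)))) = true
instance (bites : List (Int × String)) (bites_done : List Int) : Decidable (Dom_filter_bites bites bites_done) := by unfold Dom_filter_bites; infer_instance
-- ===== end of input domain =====

-- B replaces the dict comprehension by an explicit worklist loop: it pops the items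
-- back-to-front, appends the kept pairs, reverses at the end; same result, alternative decomposition.

-- ===== PORT A =====
-- {num: bite for num, bite in bites.items() if num not in bites_done}
def filter_bites (bites : List (Int × String)) (bites_done : List Int) : List (Int × String) :=
  bites.filter (fun p => !(bites_done.contains p.1))

-- ===== PORT B =====
-- done = set(bites_done); while items: num, bite = items.pop(); if num not in done: kept.append(...)
-- kept.reverse(); return dict(kept).  The while-loop popping from the end is the fold over bites.reverse.
def filter_bites_alt (bites : List (Int × String)) (bites_done : List Int) : List (Int × String) :=
  let done : PySem.Set Int := PySem.Set.ofList bites_done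
  let kept := bites.reverse.foldl
    (fun acc p => if !(PySem.Set.contains done p.1) then acc ++ [p] else acc) []
  (PySem.Dict.mk kept.reverse).items

-- ===== PRECONDITION & SPEC =====
def Spec_filter_bites (bites : List (Int × String)) (bites_done : List Int) (out : List (Int × String)) : Prop := out = filter_bites_alt bites bites_done
instance (bites : List (Int × String)) (bites_done : List Int) (out : List (Int × String)) : Decidable (Spec_filter_bites bites bites_done out) := by unfold Spec_filter_bites; infer_instance

-- ===== CLAIM (what is proved, stated in full; the proofs are below) =====
def Claim_equal_filter_bites : Prop := ∀ (bites : List (Int × String)) (bites_done : List Int), Dom_filter_bites bites bites_done → Spec_filter_bites bites bites_done (filter_bites bites bites_done)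

-- ===== LEMMAS AND PROOFS =====

-- ===== VERDICT (by name: the statement is the Claim_ definition above) =====
theorem filter_bites_spec : Claim_equal_filter_bites := by
  intro bites bites_done _
  unfold Spec_filter_bites filter_bites filter_bites_alt
  simp only [PySem.List.foldl_append_if_eq_filter, List.filter_reverse, List.nil_append,
      List.reverse_reverse]
  apply List.filter_congr
  intro p _
  simp [PySem.Set.contains, PySem.Set.mem_ofList]
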